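-- pv_equiv track=rewrite | github.com/javiercorrea1255/agridoser.com | backend/services/fertiirrigation_ai_optimizer.py | _has_nitrate_alternative
-- ===== SOURCE A (Python) =====
-- from typing import Dict, List, Any, Optional, Tuple
--
-- NITRATE_PATTERNS = ['nitrato', 'nitrate']
--
-- def _is_nitrate_fertilizer(fert_name: str) -> bool:
--     """Check if fertilizer name indicates a nitrate source."""
--     name_lower = fert_name.lower()
--     return any(pattern in name_lower for pattern in NITRATE_PATTERNS)
--
-- def _has_nitrate_alternative(fert_name: str, all_fertilizers: List[Dict]) -> bool:
--     """Check if there's a nitrate alternative for this sulfate fertilizer."""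
--     name_lower = fert_name.lower()
--
--     if 'magnesio' in name_lower or 'magnesium' in name_lower:
--         for f in all_fertilizers:
--             fname = (f.get('name') or '').lower()
--             if ('magnesio' in fname or 'magnesium' in fname) and _is_nitrate_fertilizer(fname):
--                 return True
--
--     if 'potasio' in name_lower or 'potassium' in name_lower:
--         for f in all_fertilizers:
--             fname = (f.get('name') or '').lower()
--             if ('potasio' in fname or 'potassium' in fname) and _is_nitrate_fertilizer(fname):
--                 return True
--
--     return False
-- ===== SOURCE B (Python) =====
-- NITRATE_PATTERNS = ['nitrato', 'nitrate']
--
--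
-- def _required_nutrients(name_lower):
--     """Nutrients this (lowercased) fertilizer name asks for."""
--     required = set()
--     if 'magnesio' in name_lower or 'magnesium' in name_lower:
--         required.add('mg')
--     if 'potasio' in name_lower or 'potassium' in name_lower:
--         required.add('k')
--     return required
--
--
-- def _available_nutrients(all_fertilizers):
--     """One pass: nutrients offered by some nitrate fertilizer in the list."""
--     available = set()
--     for f in all_fertilizers:
--         fname = (f.get('name') or '').lower()
--         if any(p in fname for p in NITRATE_PATTERNS):
--             if 'magnesio' in fname or 'magnesium' in fname:
--                 available.add('mg')
--             if 'potasio' in fname or 'potassium' in fname: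
--                 available.add('k')
--     return available
--
--
-- def _has_nitrate_alternative(fert_name, all_fertilizers):
--     required = _required_nutrients(fert_name.lower())
--     if not required:
--         return False
--     return bool(required & _available_nutrients(all_fertilizers))
-- ===== Notes on version B (the rewrite author's own statement) =====
-- stated objective: alternative
-- what changed: A's two guarded scans over the fertilizer list (one per nutrient) are replaced by computing a required-nutrient set from the name and one single pass that collects the nutrients offered by nitrate fertilizers, answering by set intersection.
import Mathlib
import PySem

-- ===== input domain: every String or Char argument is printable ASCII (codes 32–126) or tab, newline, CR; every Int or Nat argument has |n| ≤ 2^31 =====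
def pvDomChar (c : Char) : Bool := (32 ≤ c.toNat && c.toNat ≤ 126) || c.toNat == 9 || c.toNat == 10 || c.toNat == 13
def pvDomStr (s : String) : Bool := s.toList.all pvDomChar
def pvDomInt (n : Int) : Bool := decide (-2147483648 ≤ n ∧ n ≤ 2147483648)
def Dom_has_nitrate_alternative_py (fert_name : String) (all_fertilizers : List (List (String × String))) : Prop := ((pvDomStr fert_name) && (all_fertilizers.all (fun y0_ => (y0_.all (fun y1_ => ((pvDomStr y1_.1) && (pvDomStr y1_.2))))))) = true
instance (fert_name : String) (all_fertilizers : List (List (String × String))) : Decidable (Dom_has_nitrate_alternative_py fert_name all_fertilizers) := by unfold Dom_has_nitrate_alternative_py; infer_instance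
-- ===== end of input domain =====

-- B replaces A's two guarded scans over the fertilizer list by one pass that builds an
-- availability set, plus a required/available set intersection (objective: alternative
-- decomposition, same cost).

-- ===== PORT A =====
-- module constant NITRATE_PATTERNS (shared by both versions, as in the Python module)
def NITRATE_PATTERNS : List String := ["nitrato", "nitrate"]

def is_nitrate_fertilizer (fert_name : String) : Bool :=
  let name_lower := PySem.Str.lower fert_name
  NITRATE_PATTERNS.any (fun pattern => PySem.Str.isIn pattern name_lower)

def has_nitrate_alternative_py (fert_name : String) (all_fertilizers : List (List (String × String))) : Bool :=
  let name_lower := PySem.Str.lower fert_name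
  if (PySem.Str.isIn "magnesio" name_lower || PySem.Str.isIn "magnesium" name_lower)
      && all_fertilizers.any (fun f =>
        let fname := PySem.Str.lower (((PySem.Dict.mk f).get? "name").getD "")
        (PySem.Str.isIn "magnesio" fname || PySem.Str.isIn "magnesium" fname)
          && is_nitrate_fertilizer fname) then
    true
  else if (PySem.Str.isIn "potasio" name_lower || PySem.Str.isIn "potassium" name_lower)
      && all_fertilizers.any (fun f =>
        let fname := PySem.Str.lower (((PySem.Dict.mk f).get? "name").getD "")
        (PySem.Str.isIn "potasio" fname || PySem.Str.isIn "potassium" fname)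
          && is_nitrate_fertilizer fname) then
    true
  else
    false

-- ===== PORT B =====
def required_nutrients (name_lower : String) : PySem.Set String :=
  let required : PySem.Set String := PySem.Set.empty
  let required := if PySem.Str.isIn "magnesio" name_lower || PySem.Str.isIn "magnesium" name_lower
                  then PySem.Set.add required "mg" else required
  if PySem.Str.isIn "potasio" name_lower || PySem.Str.isIn "potassium" name_lower
  then PySem.Set.add required "k" else required

def available_nutrients (all_fertilizers : List (List (String × String))) : PySem.Set String :=
  all_fertilizers.foldl (fun available f =>
    let fname := PySem.Str.lower (((PySem.Dict.mk f).get? "name").getD "")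
    if NITRATE_PATTERNS.any (fun p => PySem.Str.isIn p fname) then
      let available := if PySem.Str.isIn "magnesio" fname || PySem.Str.isIn "magnesium" fname
                       then PySem.Set.add available "mg" else available
      if PySem.Str.isIn "potasio" fname || PySem.Str.isIn "potassium" fname
      then PySem.Set.add available "k" else available
    else available) PySem.Set.empty

def has_nitrate_alternative_py_alt (fert_name : String) (all_fertilizers : List (List (String × String))) : Bool :=
  let required := required_nutrients (PySem.Str.lower fert_name)
  if PySem.Set.len required == 0 then
    false
  else
    PySem.Set.len (PySem.Set.inter required (available_nutrients all_fertilizers)) != 0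

-- ===== PRECONDITION & SPEC =====
def Spec_has_nitrate_alternative_py (fert_name : String) (all_fertilizers : List (List (String × String))) (out : Bool) : Prop := out = has_nitrate_alternative_py_alt fert_name all_fertilizers
instance (fert_name : String) (all_fertilizers : List (List (String × String))) (out : Bool) : Decidable (Spec_has_nitrate_alternative_py fert_name all_fertilizers out) := by unfold Spec_has_nitrate_alternative_py; infer_instance

-- ===== CLAIM (what is proved, stated in full; the proofs are below) =====
def Claim_equal_has_nitrate_alternative_py : Prop := ∀ (fert_name : String) (all_fertilizers : List (List (String × String))), Dom_has_nitrate_alternative_py fert_name all_fertilizers → Spec_has_nitrate_alternative_py fert_name all_fertilizers (has_nitrate_alternative_py fert_name all_fertilizers)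

-- ===== LEMMAS AND PROOFS =====

-- abbreviations for the three substring tests, used only by the proofs
def pvFname (f : List (String × String)) : String :=
  PySem.Str.lower (((PySem.Dict.mk f).get? "name").getD "")
def pvMg (s : String) : Bool := PySem.Str.isIn "magnesio" s || PySem.Str.isIn "magnesium" s
def pvK (s : String) : Bool := PySem.Str.isIn "potasio" s || PySem.Str.isIn "potassium" s
def pvNitr (s : String) : Bool := NITRATE_PATTERNS.any (fun p => PySem.Str.isIn p s)

theorem pv_lowerChar_idem (c : Char) :
    PySem.Chars.lowerChar (PySem.Chars.lowerChar c) = PySem.Chars.lowerChar c := by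
  unfold PySem.Chars.lowerChar PySem.Chars.isupper
  by_cases hA : 'A' ≤ c
  · by_cases hZ : c ≤ 'Z'
    · simp only [hA, hZ, decide_true, Bool.and_self, if_true]
      have h65 : 65 ≤ c.toNat := by rw [Char.le_def] at hA; exact hA
      have h90 : c.toNat ≤ 90 := by rw [Char.le_def] at hZ; exact hZ
      have hto : (Char.ofNat (c.toNat + 32)).toNat = c.toNat + 32 := by
        rw [Char.toNat_ofNat]
        have : (c.toNat + 32).isValidChar := by left; omega
        simp [this]
      have hnot : ¬ (Char.ofNat (c.toNat + 32) ≤ 'Z') := by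
        rw [Char.le_def]
        intro h
        have : (Char.ofNat (c.toNat + 32)).toNat ≤ 90 := h
        omega
      simp [hnot]
    · simp [hZ]
  · simp [hA]

theorem pv_lower_idem (s : String) :
    PySem.Str.lower (PySem.Str.lower s) = PySem.Str.lower s := by
  unfold PySem.Str.lower PySem.Chars.lower
  simp [List.map_map, Function.comp_def, pv_lowerChar_idem]

theorem pv_nitr_lower (t : String) :
    is_nitrate_fertilizer (PySem.Str.lower t) = pvNitr (PySem.Str.lower t) := by
  unfold is_nitrate_fertilizer pvNitr
  rw [pv_lower_idem]

theorem pv_if_chain (a b : Bool) : (if a then true else if b then true else false) = (a || b) := by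
  cases a <;> cases b <;> rfl

-- A as a disjunction of its two guarded scans
theorem pv_A_eq (fn : String) (fs : List (List (String × String))) :
    has_nitrate_alternative_py fn fs =
      ((pvMg (PySem.Str.lower fn) && fs.any (fun f => pvMg (pvFname f) && pvNitr (pvFname f))) ||
       (pvK (PySem.Str.lower fn) && fs.any (fun f => pvK (pvFname f) && pvNitr (pvFname f)))) := by
  simp only [has_nitrate_alternative_py, pv_nitr_lower, pv_if_chain]
  rfl

-- one step of B's scan, as a membership statement
theorem pv_mem_step (acc : PySem.Set String) (f : List (String × String)) (x : String) :
    x ∈ (let fname := PySem.Str.lower (((PySem.Dict.mk f).get? "name").getD "")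
      if NITRATE_PATTERNS.any (fun p => PySem.Str.isIn p fname) then
        let available := if PySem.Str.isIn "magnesio" fname || PySem.Str.isIn "magnesium" fname
                         then PySem.Set.add acc "mg" else acc
        if PySem.Str.isIn "potasio" fname || PySem.Str.isIn "potassium" fname
        then PySem.Set.add available "k" else available
      else acc)
    ↔ x ∈ acc ∨ (pvNitr (pvFname f) = true ∧
        ((x = "mg" ∧ pvMg (pvFname f) = true) ∨ (x = "k" ∧ pvK (pvFname f) = true))) := by
  show x ∈ (if pvNitr (pvFname f) then
        (if pvK (pvFname f) then PySem.Set.add (if pvMg (pvFname f) then PySem.Set.add acc "mg" else acc) "k"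
         else (if pvMg (pvFname f) then PySem.Set.add acc "mg" else acc))
      else acc) ↔ _
  by_cases hn : pvNitr (pvFname f) = true <;>
  by_cases hm : pvMg (pvFname f) = true <;>
  by_cases hk : pvK (pvFname f) = true <;>
    (try simp only [hn, hm, hk, Bool.not_eq_true] at *) <;>
    (try simp only [hn, hm, hk, if_true, Bool.false_eq_true, if_false, PySem.Set.mem_add]) <;>
    tauto

-- membership in B's scan result
theorem pv_mem_avail (fs : List (List (String × String))) (acc : PySem.Set String) (x : String) :
    (x ∈ fs.foldl (fun available f =>
      let fname := PySem.Str.lower (((PySem.Dict.mk f).get? "name").getD "")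
      if NITRATE_PATTERNS.any (fun p => PySem.Str.isIn p fname) then
        let available := if PySem.Str.isIn "magnesio" fname || PySem.Str.isIn "magnesium" fname
                         then PySem.Set.add available "mg" else available
        if PySem.Str.isIn "potasio" fname || PySem.Str.isIn "potassium" fname
        then PySem.Set.add available "k" else available
      else available) acc)
    ↔ x ∈ acc ∨ ∃ f ∈ fs, pvNitr (pvFname f) = true ∧
        ((x = "mg" ∧ pvMg (pvFname f) = true) ∨ (x = "k" ∧ pvK (pvFname f) = true)) := by
  induction fs generalizing acc with
  | nil => simp
  | cons f fs ih =>
    rw [List.foldl_cons, ih, pv_mem_step]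
    simp only [List.mem_cons]
    constructor
    · rintro ((h | h) | ⟨g, hg, hc⟩)
      · exact Or.inl h
      · exact Or.inr ⟨f, Or.inl rfl, h⟩
      · exact Or.inr ⟨g, Or.inr hg, hc⟩
    · rintro (h | ⟨g, (rfl | hg), hc⟩)
      · exact Or.inl (Or.inl h)
      · exact Or.inl (Or.inr hc)
      · exact Or.inr ⟨g, hg, hc⟩

theorem pv_avail_mg (fs : List (List (String × String))) :
    PySem.Set.contains (available_nutrients fs) "mg"
      = fs.any (fun f => pvMg (pvFname f) && pvNitr (pvFname f)) := by
  rw [Bool.eq_iff_iff, PySem.Set.contains_iff]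
  unfold available_nutrients
  rw [pv_mem_avail]
  simp only [List.any_eq_true, Bool.and_eq_true, PySem.Set.empty, List.not_mem_nil, false_or]
  constructor
  · rintro ⟨f, hf, hn, (⟨-, hm⟩ | ⟨hbad, -⟩)⟩
    · exact ⟨f, hf, hm, hn⟩
    · exact absurd hbad (by decide)
  · rintro ⟨f, hf, hm, hn⟩
    exact ⟨f, hf, hn, Or.inl ⟨by trivial, hm⟩⟩

theorem pv_avail_k (fs : List (List (String × String))) :
    PySem.Set.contains (available_nutrients fs) "k"
      = fs.any (fun f => pvK (pvFname f) && pvNitr (pvFname f)) := by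
  rw [Bool.eq_iff_iff, PySem.Set.contains_iff]
  unfold available_nutrients
  rw [pv_mem_avail]
  simp only [List.any_eq_true, Bool.and_eq_true, PySem.Set.empty, List.not_mem_nil, false_or]
  constructor
  · rintro ⟨f, hf, hn, (⟨hbad, -⟩ | ⟨-, hk⟩)⟩
    · exact absurd hbad (by decide)
    · exact ⟨f, hf, hk, hn⟩
  · rintro ⟨f, hf, hk, hn⟩
    exact ⟨f, hf, hn, Or.inr ⟨by trivial, hk⟩⟩

theorem pv_req_eq (s : String) :
    required_nutrients s =
      (if pvMg s then (if pvK s then ["mg", "k"] else ["mg"]) else (if pvK s then ["k"] else [])) := by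
  unfold required_nutrients pvMg pvK
  split_ifs <;> rfl

theorem pv_len_inter_ne (req s : PySem.Set String) :
    (PySem.Set.len (PySem.Set.inter req s) != 0) = req.any fun x => PySem.Set.contains s x := by
  rw [Bool.eq_iff_iff]
  simp [PySem.Set.inter, PySem.Set.len, List.any_eq_true, bne_iff_ne,
    List.length_eq_zero_iff, List.filter_eq_nil_iff, PySem.Set.contains]

-- B as the same disjunction
theorem pv_B_eq (fn : String) (fs : List (List (String × String))) :
    has_nitrate_alternative_py_alt fn fs =
      ((pvMg (PySem.Str.lower fn) && fs.any (fun f => pvMg (pvFname f) && pvNitr (pvFname f))) ||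
       (pvK (PySem.Str.lower fn) && fs.any (fun f => pvK (pvFname f) && pvNitr (pvFname f)))) := by
  unfold has_nitrate_alternative_py_alt
  rw [pv_req_eq]
  by_cases hM : pvMg (PySem.Str.lower fn) = true <;>
  by_cases hK : pvK (PySem.Str.lower fn) = true <;>
    (try simp only [Bool.not_eq_true] at *) <;>
    simp only [hM, hK, if_true, Bool.false_eq_true, if_false] <;>
    simp only [pv_len_inter_ne, List.any_cons, List.any_nil, Bool.or_false,
      pv_avail_mg, pv_avail_k, Bool.true_and, Bool.false_and, Bool.or_false, Bool.false_or] <;>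
    rfl

-- ===== VERDICT (by name: the statement is the Claim_ definition above) =====
theorem has_nitrate_alternative_py_spec : Claim_equal_has_nitrate_alternative_py := by
  intro fn fs _
  unfold Spec_has_nitrate_alternative_py
  rw [pv_A_eq, pv_B_eq]
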